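-- pv_equiv track=rewrite | github.com/WangYue1998/Python-project | project9/proj09.py | get_histogram_tag_count_for_users
-- ===== SOURCE A (Python) =====
-- def get_histogram_tag_count_for_users(data,usernames):
--     '''This function creates a histogram of hashtags for how often they occur.
--     The key is the hashtag; the value is the count of occurrences of the
--     hashtag.This function return the histogram as a dictionary.'''
--     word_count_dict= {}
--     for ch2 in data:
--         if ch2[0] in usernames:
--             for word in ch2[2]:
--
--                 if word in word_count_dict:
--                     word_count_dict[word] +=1
--                 else:
--                     word_count_dict[word] = 1
--
--     return word_count_dict
-- ===== SOURCE B (Python) =====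
-- def get_histogram_tag_count_for_users(data, usernames):
--     '''Collect all hashtags of the selected users into one list, then build the
--     histogram in a second pass: one entry per distinct hashtag (first-occurrence
--     order, as dict.fromkeys gives), counted with list.count.'''
--     words = []
--     for ch2 in data:
--         if ch2[0] in usernames:
--             words.extend(ch2[2])
--     return {w: words.count(w) for w in dict.fromkeys(words)}
-- ===== Notes on version B (the rewrite author's own statement) =====
-- stated objective: alternative
-- what changed: A counts into a dict while streaming each word; B first collects all selected users' hashtags into one list, then builds the histogram in a separate pass over the distinct words, counting each with list.count.
import Mathlib
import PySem

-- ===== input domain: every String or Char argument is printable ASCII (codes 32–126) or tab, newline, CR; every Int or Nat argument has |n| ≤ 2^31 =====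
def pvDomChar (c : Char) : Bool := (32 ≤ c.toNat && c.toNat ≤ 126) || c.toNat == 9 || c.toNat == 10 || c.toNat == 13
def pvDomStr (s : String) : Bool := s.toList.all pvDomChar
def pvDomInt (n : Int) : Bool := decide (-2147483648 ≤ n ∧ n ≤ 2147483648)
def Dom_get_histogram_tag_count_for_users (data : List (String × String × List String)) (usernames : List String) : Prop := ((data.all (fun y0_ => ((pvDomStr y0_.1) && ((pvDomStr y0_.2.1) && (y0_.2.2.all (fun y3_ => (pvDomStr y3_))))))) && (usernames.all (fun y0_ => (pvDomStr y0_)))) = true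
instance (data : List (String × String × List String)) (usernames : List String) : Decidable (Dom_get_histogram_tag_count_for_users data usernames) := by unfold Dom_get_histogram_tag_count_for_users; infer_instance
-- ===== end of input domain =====

-- B changes the decomposition: collect all selected users' hashtags first, then count each distinct word in a second pass; same cost class, not claimed faster.
-- ===== PORT A =====
def get_histogram_tag_count_for_users (data : List (String × String × List String)) (usernames : List String) : List (String × Int) :=
  (data.foldl (fun word_count_dict ch2 =>
    if usernames.contains ch2.1 then
      ch2.2.2.foldl (fun d word =>
        if d.contains word then d.insert word (d.getD word 0 + 1) else d.insert word 1) word_count_dict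
    else word_count_dict) (PySem.Dict.empty : PySem.Dict String Int)).items

-- ===== PORT B =====
def get_histogram_tag_count_for_users_alt (data : List (String × String × List String)) (usernames : List String) : List (String × Int) :=
  let words := data.foldl (fun ws ch2 => if usernames.contains ch2.1 then ws ++ ch2.2.2 else ws) []
  (PySem.List.dedup words).map (fun w => (w, (words.count w : Int)))

-- ===== PRECONDITION & SPEC =====
def Spec_get_histogram_tag_count_for_users (data : List (String × String × List String)) (usernames : List String) (out : List (String × Int)) : Prop := out = get_histogram_tag_count_for_users_alt data usernames
instance (data : List (String × String × List String)) (usernames : List String) (out : List (String × Int)) : Decidable (Spec_get_histogram_tag_count_for_users data usernames out) := by unfold Spec_get_histogram_tag_count_for_users; infer_instance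

-- ===== CLAIM (what is proved, stated in full; the proofs are below) =====
def Claim_equal_get_histogram_tag_count_for_users : Prop := ∀ (data : List (String × String × List String)) (usernames : List String), Dom_get_histogram_tag_count_for_users data usernames → Spec_get_histogram_tag_count_for_users data usernames (get_histogram_tag_count_for_users data usernames)

-- ===== LEMMAS AND PROOFS =====

-- A's two branches both set word's value to its old count (default 0) plus one.
theorem stepA_eq_counter_step (d : PySem.Dict String Int) (word : String) :
    (if d.contains word then d.insert word (d.getD word 0 + 1) else d.insert word 1)
      = d.insert word (d.getD word 0 + 1) := by
  by_cases h : d.contains word = true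
  · simp [h]
  · simp [Bool.not_eq_true] at h
    rw [PySem.Dict.getD_of_not_contains d 0 h]; simp [h]

-- A's nested fold over data equals the counting fold over B's flattened word list.
theorem foldA_eq_fold_words (data : List (String × String × List String)) (usernames : List String)
    (d : PySem.Dict String Int) (ws : List String) :
    data.foldl (fun word_count_dict ch2 =>
      if usernames.contains ch2.1 then
        ch2.2.2.foldl (fun d word =>
          if d.contains word then d.insert word (d.getD word 0 + 1) else d.insert word 1) word_count_dict
      else word_count_dict) (ws.foldl (fun d x => d.insert x (d.getD x 0 + 1)) d)
    = (data.foldl (fun ws ch2 => if usernames.contains ch2.1 then ws ++ ch2.2.2 else ws) ws).foldl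
        (fun d x => d.insert x (d.getD x 0 + 1)) d := by
  induction data generalizing ws with
  | nil => rfl
  | cons ch2 rest ih =>
    simp only [List.foldl_cons]
    by_cases h : usernames.contains ch2.1 = true
    · simp only [h, if_true]
      rw [← ih (ws ++ ch2.2.2), List.foldl_append]
      congr 1
      exact List.foldl_ext _ _ _ (fun d w _ => stepA_eq_counter_step d w)
    · simp only [Bool.not_eq_true] at h
      simp only [h, Bool.false_eq_true, if_false]
      exact ih ws

-- ===== VERDICT (by name: the statement is the Claim_ definition above) =====
theorem get_histogram_tag_count_for_users_spec : Claim_equal_get_histogram_tag_count_for_users := by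
  intro data usernames _
  unfold Spec_get_histogram_tag_count_for_users get_histogram_tag_count_for_users get_histogram_tag_count_for_users_alt
  have h := foldA_eq_fold_words data usernames PySem.Dict.empty []
  simp only [List.foldl_nil] at h
  rw [h, PySem.Dict.foldl_insert_getD_add_one_eq_counter, PySem.Dict.items_counter]
  simp [PySem.List.dedup_eq_ofList]
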